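-- pv_equiv track=rewrite | github.com/leehyeji319/PS | 프로그래머스/피어리뷰/1주차 중간고사_2.py | solution
-- ===== SOURCE A (Python) =====
-- def solution(people, tshirts):
--     answer = 0
--     people.sort()
--     tshirts.sort()
--
--     for p in range(len(people)):
--         if people[p] in tshirts:
--             del tshirts[tshirts.index(people[p])]
--             answer += 1
--         elif people[p] not in tshirts:
--             tshirts = [i for i in tshirts if i > people[p]]
--             if len(tshirts) > 0:
--                 answer += 1
--                 del tshirts[0]
--     return answer
-- ===== SOURCE B (Python) =====
-- def solution(people, tshirts):
--     # two-pointer greedy over the two sorted arrays: each person (ascending)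
--     # takes the smallest remaining tshirt >= their size
--     people.sort()
--     tshirts.sort()
--     j = 0
--     n = len(tshirts)
--     count = 0
--     for p in people:
--         while j < n and tshirts[j] < p:
--             j += 1
--         if j == n:
--             break
--         count += 1
--         j += 1
--     return count
-- ===== Notes on version B (the rewrite author's own statement) =====
-- stated objective: faster
-- what changed: Replaces the per-person membership test, list.index and list-comprehension rebuild of tshirts (each a scan of the shirt list) with a single two-pointer sweep over the two sorted lists.
import Mathlib
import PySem

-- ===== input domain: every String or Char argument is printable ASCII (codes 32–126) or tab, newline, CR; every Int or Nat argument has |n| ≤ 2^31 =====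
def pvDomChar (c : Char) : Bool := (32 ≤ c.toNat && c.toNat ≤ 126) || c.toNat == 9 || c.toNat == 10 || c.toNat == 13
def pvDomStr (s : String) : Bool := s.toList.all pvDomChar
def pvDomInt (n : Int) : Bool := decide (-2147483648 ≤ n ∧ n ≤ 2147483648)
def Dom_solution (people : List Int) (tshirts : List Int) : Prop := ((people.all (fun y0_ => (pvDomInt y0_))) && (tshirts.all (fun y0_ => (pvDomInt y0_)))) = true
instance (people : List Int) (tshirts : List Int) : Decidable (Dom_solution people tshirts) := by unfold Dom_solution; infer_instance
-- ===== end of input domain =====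

-- B replaces A's per-person membership test / list.index / comprehension rebuild of tshirts with a
-- single two-pointer sweep over the two sorted lists. Equivalence is about the RETURN value only:
-- Python A sorts `people` and `tshirts` in place (B performs the same in-place sorts).

-- ===== PORT A =====
-- one iteration of A's for-loop: state = (tshirts, answer), x = people[p]
def stepA (st : List Int × Int) (x : Int) : List Int × Int :=
  if st.1.contains x then
    -- del tshirts[tshirts.index(x)] = remove the first occurrence; the guard ensures `some`
    ((PySem.List.remove? st.1 x).getD st.1, st.2 + 1)
  else if !(st.1.contains x) then
    let ts' := st.1.filter (fun i => decide (x < i))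
    if 0 < ts'.length then (ts'.tail, st.2 + 1) else (ts', st.2)  -- del tshirts[0] on a nonempty list = tail
  else st

def solution (people : List Int) (tshirts : List Int) : Int :=
  let ps := PySem.List.sorted people (fun x => x)
  let ts := PySem.List.sorted tshirts (fun x => x)
  ((PySem.List.pyRange 0 (ps.length : Int)).foldl
    (fun st p => stepA st (PySem.List.pyGetD ps p 0)) (ts, 0)).2

-- ===== PORT B =====
-- Source B's loop over people with pointer j into tshirts: the while advances j past shirts < p
-- (dropWhile on the remaining suffix), `if j == n: break` is the [] case
def goB : List Int → List Int → Int
  | [], _ => 0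
  | p :: ps, ts =>
    match ts.dropWhile (fun t => decide (t < p)) with
    | [] => 0
    | _ :: rest => 1 + goB ps rest

def solution_alt (people : List Int) (tshirts : List Int) : Int :=
  goB (PySem.List.sorted people (fun x => x)) (PySem.List.sorted tshirts (fun x => x))

-- ===== PRECONDITION & SPEC =====
def Spec_solution (people : List Int) (tshirts : List Int) (out : Int) : Prop := out = solution_alt people tshirts
instance (people : List Int) (tshirts : List Int) (out : Int) : Decidable (Spec_solution people tshirts out) := by unfold Spec_solution; infer_instance

-- ===== CLAIM (what is proved, stated in full; the proofs are below) =====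
def Claim_equal_solution : Prop := ∀ (people : List Int) (tshirts : List Int), Dom_solution people tshirts → Spec_solution people tshirts (solution people tshirts)

-- ===== LEMMAS AND PROOFS =====

lemma dropWhile_lt_dropWhile_lt (l : List Int) (c p : Int) (h : c ≤ p) :
    (l.dropWhile (fun t => decide (t < c))).dropWhile (fun t => decide (t < p))
      = l.dropWhile (fun t => decide (t < p)) := by
  induction l with
  | nil => rfl
  | cons x xs ih =>
    by_cases hx : x < c
    · have hxp : x < p := lt_of_lt_of_le hx h
      simp [hx, hxp, ih]
    · simp [List.dropWhile_cons, hx]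

lemma goB_dropWhile (ps ts : List Int) (c : Int) (h : ∀ q ∈ ps, c ≤ q) :
    goB ps (ts.dropWhile (fun t => decide (t < c))) = goB ps ts := by
  cases ps with
  | nil => rfl
  | cons p ps =>
    have hc : c ≤ p := h p (by simp)
    simp only [goB, dropWhile_lt_dropWhile_lt ts c p hc]

lemma foldl_stepA_nil (ps : List Int) (a : Int) : (ps.foldl stepA ([], a)).2 = a := by
  induction ps generalizing a with
  | nil => rfl
  | cons p ps ih => simpa [stepA] using ih a

lemma foldl_stepA_eq_goB (ps : List Int) : ∀ (ts : List Int) (a : Int),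
    ps.Pairwise (· ≤ ·) → ts.Pairwise (· ≤ ·) →
    (ps.foldl stepA (ts, a)).2 = a + goB ps ts := by
  induction ps with
  | nil => intro ts a _ _; simp [goB]
  | cons p ps ih =>
    intro ts a hps hts
    obtain ⟨hple, hps'⟩ := List.pairwise_cons.mp hps
    have hTD : ts.takeWhile (fun t => decide (t < p)) ++ ts.dropWhile (fun t => decide (t < p)) = ts :=
      List.takeWhile_append_dropWhile
    set T := ts.takeWhile (fun t => decide (t < p)) with hT
    set D := ts.dropWhile (fun t => decide (t < p)) with hD
    have hTlt : ∀ x ∈ T, x < p := by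
      intro x hx
      have := List.mem_takeWhile_imp (hT ▸ hx)
      simpa using this
    have hDpair : D.Pairwise (· ≤ ·) := by
      rw [hD]; exact hts.sublist (List.dropWhile_sublist _)
    have hDge : ∀ x ∈ D, p ≤ x := by
      cases hDc : D with
      | nil => simp
      | cons d rest =>
        have hd : ¬ d < p := by
          have := List.head_dropWhile_not (fun t : Int => decide (t < p)) (l := ts)
            (by rw [← hD, hDc]; simp)
          simp only [← hD, hDc] at this
          simpa using this
        intro x hx
        rcases List.mem_cons.mp hx with h1 | h1
        · omega
        · have : d ≤ x := (List.pairwise_cons.mp (hDc ▸ hDpair)).1 x h1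
          omega
    by_cases hp : p ∈ ts
    · -- membership branch: del tshirts[tshirts.index(p)]
      have hpT : p ∉ T := fun hmem => lt_irrefl p (hTlt p hmem)
      have hpD : p ∈ D := by
        have := hTD ▸ hp
        rcases List.mem_append.mp this with h1 | h1
        · exact absurd h1 hpT
        · exact h1
      obtain ⟨d, rest, hDc⟩ := List.exists_cons_of_ne_nil (List.ne_nil_of_mem hpD)
      have hdp : d = p := by
        have h1 : p ≤ d := hDge d (by simp [hDc])
        rcases List.mem_cons.mp (hDc ▸ hpD) with h2 | h2
        · omega
        · have : d ≤ p := (List.pairwise_cons.mp (hDc ▸ hDpair)).1 p h2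
          omega
      have herase : ts.erase p = T ++ rest := by
        conv_lhs => rw [← hTD, hDc, hdp]
        rw [List.erase_append_right _ (by simpa using hpT)]
        simp
      have hcont : ts.contains p = true := by simpa using hp
      have hstep : stepA (ts, a) p = (T ++ rest, a + 1) := by
        simp only [stepA, hcont]
        rw [PySem.List.remove?_eq_some_erase ts p hp]
        simp [herase]
      have hsorted' : (T ++ rest).Pairwise (· ≤ ·) := by
        rw [← herase]; exact hts.sublist List.erase_sublist
      have hdrop : (T ++ rest).dropWhile (fun t => decide (t < p)) = rest := by
        rw [List.dropWhile_append]
        have h1 : T.dropWhile (fun t => decide (t < p)) = [] := by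
          rw [List.dropWhile_eq_nil_iff]
          intro x hx; simpa using hTlt x hx
        have h2 : rest.dropWhile (fun t => decide (t < p)) = rest := by
          cases hr : rest with
          | nil => rfl
          | cons r rs =>
            have : p ≤ r := hDge r (by simp [hDc, hr])
            simp [not_lt_of_ge this]
        simp [h1, h2]
      have hgoB : goB ps (T ++ rest) = goB ps rest := by
        rw [← goB_dropWhile ps (T ++ rest) p hple, hdrop]
      calc ((p :: ps).foldl stepA (ts, a)).2
          = (ps.foldl stepA (T ++ rest, a + 1)).2 := by rw [List.foldl_cons, hstep]
        _ = (a + 1) + goB ps (T ++ rest) := ih (T ++ rest) (a + 1) hps' hsorted'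
        _ = a + goB (p :: ps) ts := by
              rw [hgoB]
              simp only [goB, ← hD, hDc]
              ring
    · -- non-membership branch: the comprehension [i for i in tshirts if i > p]
      have hcont : ts.contains p = false := by simpa using hp
      have hfilter : ts.filter (fun i => decide (p < i)) = D := by
        conv_lhs => rw [← hTD]
        rw [List.filter_append]
        have h1 : T.filter (fun i => decide (p < i)) = [] := by
          rw [List.filter_eq_nil_iff]
          intro x hx
          have := hTlt x hx
          simp; omega
        have h2 : D.filter (fun i => decide (p < i)) = D := by
          rw [List.filter_eq_self]
          intro x hx
          have h3 := hDge x hx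
          have h4 : x ≠ p := fun he => hp (he ▸ (hTD ▸ List.mem_append.mpr (Or.inr hx)))
          simp; omega
        simp [h1, h2]
      cases hDc : D with
      | nil =>
        have hstep : stepA (ts, a) p = ([], a) := by
          simp [stepA, hp, hfilter, hDc]
        rw [List.foldl_cons, hstep, foldl_stepA_nil]
        simp only [goB, ← hD, hDc]
        ring
      | cons d rest =>
        have hstep : stepA (ts, a) p = (rest, a + 1) := by
          simp [stepA, hp, hfilter, hDc]
        have hrest : rest.Pairwise (· ≤ ·) := (List.pairwise_cons.mp (hDc ▸ hDpair)).2
        rw [List.foldl_cons, hstep, ih rest (a + 1) hps' hrest]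
        simp only [goB, ← hD, hDc]
        ring

-- ===== VERDICT (by name: the statement is the Claim_ definition above) =====
theorem solution_spec : Claim_equal_solution := by
  intro people tshirts _
  show solution people tshirts = solution_alt people tshirts
  simp only [solution, solution_alt]
  rw [PySem.List.foldl_pyRange_zero_pyGetD']
  rw [foldl_stepA_eq_goB _ _ _ (PySem.List.sorted_pairwise people (fun x => x))
        (PySem.List.sorted_pairwise tshirts (fun x => x))]
  ring
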